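-- pv_equiv track=rewrite | github.com/omariba/Python-advance-tracks | koan_labs/integer_operations.py | integer_operations
-- ===== SOURCE A (Python) =====
-- def integer_operations(initial_value):
-- 	#TODO: Your code goes here
-- 	lastFive = []
-- 	increase= initial_value + 5
-- 	while initial_value <= increase:
-- 		lastFive.append(initial_value)
-- 		initial_value+=1
-- 	initial = lastFive.pop(0)
-- 	return sum(lastFive) + initial
-- ===== SOURCE B (Python) =====
-- def integer_operations(initial_value):
--     # closed form for initial_value + (initial_value+1) + ... + (initial_value+5)
--     return 6 * initial_value + 15
-- ===== Notes on version B (the rewrite author's own statement) =====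
-- stated objective: simpler
-- what changed: Replaces the list-building while loop, pop and sum with a single arithmetic-series closed-form expression.
import Mathlib
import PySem

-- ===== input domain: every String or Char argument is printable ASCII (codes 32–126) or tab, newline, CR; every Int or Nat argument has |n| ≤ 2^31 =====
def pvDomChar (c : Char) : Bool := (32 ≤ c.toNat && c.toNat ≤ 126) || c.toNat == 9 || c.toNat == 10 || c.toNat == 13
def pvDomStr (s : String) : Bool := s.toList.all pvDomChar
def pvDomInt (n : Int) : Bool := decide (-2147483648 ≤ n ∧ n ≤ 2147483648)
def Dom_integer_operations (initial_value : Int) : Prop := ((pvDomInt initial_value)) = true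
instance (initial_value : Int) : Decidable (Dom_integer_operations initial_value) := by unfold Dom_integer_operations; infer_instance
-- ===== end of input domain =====

-- B replaces A's list-building loop + pop + sum with a single closed-form expression (simpler).


-- ===== PORT A =====
-- the while loop: appends initial_value and increments it while initial_value ≤ increase
def integer_operations_loop (v increase : Int) (lastFive : List Int) : List Int :=
  if v ≤ increase then
    integer_operations_loop (v + 1) increase (lastFive ++ [v])
  else
    lastFive
termination_by (increase + 1 - v).toNat
decreasing_by omega

def integer_operations (initial_value : Int) : Int :=
  let increase := initial_value + 5
  let lastFive := integer_operations_loop initial_value increase []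
  -- lastFive.pop(0): the loop ran at least once (v ≤ v+5), so the list is nonempty
  match PySem.List.pop? lastFive 0 with
  | some (initial, rest) => rest.sum + initial
  | none => 0  -- unreachable: the loop always appends at least 6 elements

-- ===== PORT B =====
def integer_operations_alt (initial_value : Int) : Int :=
  6 * initial_value + 15

-- ===== PRECONDITION & SPEC =====
def Spec_integer_operations (initial_value : Int) (out : Int) : Prop := out = integer_operations_alt initial_value
instance (initial_value : Int) (out : Int) : Decidable (Spec_integer_operations initial_value out) := by unfold Spec_integer_operations; infer_instance

-- ===== CLAIM (what is proved, stated in full; the proofs are below) =====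
def Claim_equal_integer_operations : Prop := ∀ (initial_value : Int), Dom_integer_operations initial_value → Spec_integer_operations initial_value (integer_operations initial_value)

-- ===== LEMMAS AND PROOFS =====
theorem integer_operations_loop_eval (v : Int) (acc : List Int) :
    integer_operations_loop v (v + 5) acc = acc ++ [v, v+1, v+2, v+3, v+4, v+5] := by
  rw [integer_operations_loop, if_pos (by omega)]
  rw [integer_operations_loop, if_pos (by omega)]
  rw [integer_operations_loop, if_pos (by omega)]
  rw [integer_operations_loop, if_pos (by omega)]
  rw [integer_operations_loop, if_pos (by omega)]
  rw [integer_operations_loop, if_pos (by omega)]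
  rw [integer_operations_loop, if_neg (by omega)]
  simp
  omega

-- ===== VERDICT (by name: the statement is the Claim_ definition above) =====
theorem integer_operations_spec : Claim_equal_integer_operations := by
  intro v _
  unfold Spec_integer_operations integer_operations integer_operations_alt
  simp only [integer_operations_loop_eval v [], List.nil_append]
  simp [PySem.List.pop?, PySem.List.pyIdx?, List.sum]
  ring
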